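-- pv_equiv track=rewrite | github.com/alex3kv/PythonWebinar | Lesson6/Task5.py | sum_by_string_list
-- ===== SOURCE A (Python) =====
-- EXIT_SYMBOL = "~"
--
-- def sum_by_string_list(items):
--
--     is_exit_symbol = False
--
--     sum = 0
--
--     for item in items:
--
--         if item == EXIT_SYMBOL:
--             is_exit_symbol = True
--             break
--
--         sum += int(item)
--
--     return sum, is_exit_symbol
-- ===== SOURCE B (Python) =====
-- EXIT_SYMBOL = "~"
--
-- def sum_by_string_list(items):
--     if EXIT_SYMBOL in items:
--         return sum(map(int, items[:items.index(EXIT_SYMBOL)])), True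
--     return sum(map(int, items)), False
-- ===== Notes on version B (the rewrite author's own statement) =====
-- stated objective: simpler
-- what changed: Replaces A's fused scan-with-accumulator-and-break by a membership test plus index to locate the exit symbol, then a separate sum(map(int, ...)) over the slice before it.
import Mathlib
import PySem

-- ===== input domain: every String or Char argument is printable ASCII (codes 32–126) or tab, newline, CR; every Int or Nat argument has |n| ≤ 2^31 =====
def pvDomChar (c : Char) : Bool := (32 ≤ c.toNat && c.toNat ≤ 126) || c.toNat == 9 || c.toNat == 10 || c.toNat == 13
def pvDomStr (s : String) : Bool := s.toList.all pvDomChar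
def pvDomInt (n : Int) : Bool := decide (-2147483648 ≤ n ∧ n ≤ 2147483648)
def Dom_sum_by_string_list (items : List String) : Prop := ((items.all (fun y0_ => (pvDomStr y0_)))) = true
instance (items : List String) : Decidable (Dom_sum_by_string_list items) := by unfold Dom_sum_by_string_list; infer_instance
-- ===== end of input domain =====

-- B replaces A's fused scan-and-accumulate loop by locating the exit symbol first and summing the prefix separately (objective: simpler).
-- ===== PORT A =====
def sumByStringListGo : List String → Int → Int × Bool
  | [], s => (s, false)
  | item :: rest, s =>
    if item = "~" then (s, true)
    else sumByStringListGo rest (s + (PySem.Int.ofStr? item).getD 0)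

def sum_by_string_list (items : List String) : Int × Bool :=
  sumByStringListGo items 0

-- ===== PORT B =====
def sum_by_string_list_alt (items : List String) : Int × Bool :=
  if "~" ∈ items then
    (((PySem.List.slice items none
        (some (((PySem.List.index? items "~").getD 0 : Nat) : Int))).map
          (fun s => (PySem.Int.ofStr? s).getD 0)).sum, true)
  else ((items.map (fun s => (PySem.Int.ofStr? s).getD 0)).sum, false)

-- ===== PRECONDITION & SPEC =====
-- Pre_ excludes exactly the inputs where Python's int() raises ValueError: some element
-- before the first exit symbol is not an int literal.
def Pre_sum_by_string_list (items : List String) : Prop :=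
  ∀ s ∈ items.takeWhile (fun s => s ≠ "~"), (PySem.Int.ofStr? s).isSome

instance (items : List String) : Decidable (Pre_sum_by_string_list items) := by
  unfold Pre_sum_by_string_list; infer_instance

def pvWitness_sum_by_string_list : List String := ["1", "-2", "~", "x"]

def Spec_sum_by_string_list (items : List String) (out : Int × Bool) : Prop := out = sum_by_string_list_alt items
instance (items : List String) (out : Int × Bool) : Decidable (Spec_sum_by_string_list items out) := by unfold Spec_sum_by_string_list; infer_instance

-- ===== CLAIM (what is proved, stated in full; the proofs are below) =====
def Claim_equal_sum_by_string_list : Prop := ∀ (items : List String), Dom_sum_by_string_list items → Pre_sum_by_string_list items → Spec_sum_by_string_list items (sum_by_string_list items)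

-- ===== LEMMAS AND PROOFS =====

lemma alt_nil : sum_by_string_list_alt [] = (0, false) := by decide

lemma go_eq_alt : ∀ (items : List String) (acc : Int),
    sumByStringListGo items acc =
      ((sum_by_string_list_alt items).1 + acc, (sum_by_string_list_alt items).2) := by
  intro items
  induction items with
  | nil => intro acc; simp [sumByStringListGo, alt_nil]
  | cons item rest ih =>
    intro acc
    by_cases h : item = "~"
    · subst h
      simp [sumByStringListGo, sum_by_string_list_alt, PySem.List.index?_cons_self,
        PySem.List.slice_zero_start, PySem.List.slice]
    · have hmem : ("~" ∈ item :: rest) ↔ ("~" ∈ rest) := by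
        simp [h]; intro hc; exact absurd hc.symm h
      rw [sumByStringListGo]
      simp only [if_neg h]
      rw [ih]
      by_cases hr : "~" ∈ rest
      · obtain ⟨k, hk⟩ := Option.isSome_iff_exists.mp
          ((PySem.List.index?_isSome_iff (xs := rest) (v := "~")).mpr hr)
        have hidx : PySem.List.index? (item :: rest) "~" = some (k + 1) := by
          rw [PySem.List.index?_cons_of_ne rest h, hk]; rfl
        simp only [sum_by_string_list_alt, if_pos hr, if_pos (hmem.mpr hr), hidx, hk,
          Option.getD_some]
        rw [show ((((k + 1 : Nat)) : Int)) = (((k + 1 : Nat) : Int)) from rfl]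
        rw [PySem.List.slice_to_natCast, PySem.List.slice_to_natCast]
        simp [List.take_succ_cons]
        ring
      · simp only [sum_by_string_list_alt, if_neg hr, if_neg (fun hc => hr (hmem.mp hc))]
        simp; ring

-- ===== VERDICT (by name: the statement is the Claim_ definition above) =====
theorem sum_by_string_list_spec : Claim_equal_sum_by_string_list := by
  intro items _ _
  unfold Spec_sum_by_string_list sum_by_string_list
  rw [go_eq_alt]
  simp
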